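-- pv_equiv track=rewrite | github.com/choppedpineapple/Advanced_Metagenomics | file_parsing/config.3.2.py | build_tiles
-- ===== SOURCE A (Python) =====
-- MIN_LINKER   = 15         # minimum tile length (we use 41,31,21,15)
--
-- COMP = str.maketrans("ACGTUNacgtun", "TGCANNtgcann")
--
-- def rc(s: str) -> str:
--     return s.translate(COMP)[::-1]
--
-- def build_tiles(linker: str):
--     """
--     Build a small set of tiles: all contiguous substrings of lengths
--     [41, 31, 21, MIN_LINKER] from linker and its RC.
--
--     Returns a list of (tile_seq, orient) with orient in {'+','-'},
--     sorted roughly by length descending.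
--     """
--     linker = linker.upper().replace("U", "T")
--     L = len(linker)
--     rc_linker = rc(linker)
--
--     lengths = []
--     for k in (L, 31, 21, MIN_LINKER):
--         if k <= L:
--             lengths.append(k)
--     lengths = sorted(set(lengths), reverse=True)
--
--     tiles = []
--     for seq, orient in ((linker, '+'), (rc_linker, '-')):
--         for k in lengths:
--             for i in range(0, L - k + 1):
--                 tiles.append((seq[i:i+k], orient))
--     # sort tiles by length desc so we prefer longer matches
--     tiles.sort(key=lambda x: len(x[0]), reverse=True)
--     return tiles
-- ===== SOURCE B (Python) =====
-- MIN_LINKER = 15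
--
-- COMP = str.maketrans("ACGTUNacgtun", "TGCANNtgcann")
--
-- def rc(s: str) -> str:
--     return s.translate(COMP)[::-1]
--
-- def build_tiles(linker: str):
--     # Mirror-image algorithm: only the forward strand is ever scanned.  For each
--     # distinct length (descending) we build the window list once; the '+' tiles are
--     # those windows, and the '-' tiles are obtained by reverse-complementing each
--     # window, walking the window list backwards (a window of rc(linker) at
--     # position i IS rc of the linker window at the mirrored position).  The rc
--     # string is never materialised and no sort is needed.
--     linker = linker.upper().replace("U", "T")
--     L = len(linker)
--     lengths = sorted({k for k in (L, 31, 21, MIN_LINKER) if k <= L}, reverse=True)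
--     tiles = []
--     for k in lengths:
--         windows = [linker[i:i + k] for i in range(L - k + 1)]
--         tiles.extend((w, '+') for w in windows)
--         tiles.extend((rc(w), '-') for w in reversed(windows))
--     return tiles
-- ===== Notes on version B (the rewrite author's own statement) =====
-- stated objective: alternative
-- what changed: B never materialises or scans the reverse-complement strand: per length it builds the forward window list once, emits it as the forward tiles, and derives the reverse-strand tiles by reverse-complementing each window while walking that list backwards (mirror identity rc(linker)[i:i+k] = rc(linker[L-k-i:L-i])), emitting groups in final order so A's build-then-stable-sort pass disappears.
import Mathlib
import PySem

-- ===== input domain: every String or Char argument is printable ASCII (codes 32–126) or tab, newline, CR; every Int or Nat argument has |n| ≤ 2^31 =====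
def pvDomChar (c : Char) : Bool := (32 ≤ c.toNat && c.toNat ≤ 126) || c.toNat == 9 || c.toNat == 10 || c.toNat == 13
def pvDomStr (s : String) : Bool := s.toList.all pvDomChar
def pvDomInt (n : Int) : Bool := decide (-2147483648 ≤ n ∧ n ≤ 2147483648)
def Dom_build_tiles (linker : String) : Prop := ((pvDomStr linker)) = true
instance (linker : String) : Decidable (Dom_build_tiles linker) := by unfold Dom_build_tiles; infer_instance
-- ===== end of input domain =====

-- B never builds the reverse-complement strand: per length it builds the forward window list
-- once, emits it as the '+' tiles and derives the '-' tiles by reverse-complementing each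
-- window walking that list backwards, in final order, so A's stable sort disappears
-- (objective: alternative).

-- ===== PORT A =====

-- COMP = str.maketrans("ACGTUNacgtun", "TGCANNtgcann"), applied per character
def pvComp (c : Char) : Char :=
  if c = 'A' then 'T' else if c = 'C' then 'G' else if c = 'G' then 'C'
  else if c = 'T' then 'A' else if c = 'U' then 'N' else if c = 'N' then 'N'
  else if c = 'a' then 't' else if c = 'c' then 'g' else if c = 'g' then 'c'
  else if c = 't' then 'a' else if c = 'u' then 'n' else if c = 'n' then 'n'
  else c

-- rc(s) = s.translate(COMP)[::-1]  ([::-1] = reverse)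
def pvRc (s : String) : String := String.ofList ((s.toList.map pvComp).reverse)

def MIN_LINKER : Int := 15

def build_tiles (linker : String) : List (String × String) :=
  let linker := PySem.Str.replace (PySem.Str.upper linker) "U" "T"
  let L : Int := PySem.Str.len linker
  let rc_linker := pvRc linker
  let lengths : List Int :=
    [L, 31, 21, MIN_LINKER].foldl (fun acc k => if k ≤ L then acc ++ [k] else acc) []
  let lengths := PySem.List.sorted (PySem.Set.ofList lengths) (fun x => x) true
  let tiles : List (String × String) :=
    [(linker, "+"), (rc_linker, "-")].foldl (fun acc p =>
      lengths.foldl (fun acc k =>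
        (PySem.List.pyRange 0 (L - k + 1) 1).foldl (fun acc i =>
          acc ++ [(PySem.Str.slice p.1 (some i) (some (i + k)), p.2)]) acc) acc) []
  PySem.List.sorted tiles (fun t => PySem.Str.len t.1) true

-- ===== PORT B =====

def build_tiles_alt (linker : String) : List (String × String) :=
  let linker := PySem.Str.replace (PySem.Str.upper linker) "U" "T"
  let L : Int := PySem.Str.len linker
  let lengths : List Int :=
    PySem.List.sorted
      (PySem.Set.ofList ([L, 31, 21, MIN_LINKER].filter (fun k => k ≤ L))) (fun x => x) true
  lengths.foldl (fun tiles k =>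
    let windows : List String :=
      (PySem.List.pyRange 0 (L - k + 1) 1).map
        (fun i => PySem.Str.slice linker (some i) (some (i + k)))
    (tiles ++ windows.map (fun w => (w, "+")))
      ++ windows.reverse.map (fun w => (pvRc w, "-"))) []

-- ===== PRECONDITION & SPEC =====
def Spec_build_tiles (linker : String) (out : List (String × String)) : Prop := out = build_tiles_alt linker
instance (linker : String) (out : List (String × String)) : Decidable (Spec_build_tiles linker out) := by unfold Spec_build_tiles; infer_instance

-- ===== CLAIM (what is proved, stated in full; the proofs are below) =====
def Claim_equal_build_tiles : Prop := ∀ (linker : String), Dom_build_tiles linker → Spec_build_tiles linker (build_tiles linker)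

-- ===== LEMMAS AND PROOFS =====

-- insertion (reverse=True comparator) into hs ++ ls with all hs-keys ≥ key x > all ls-keys lands between them
theorem pv_insert_split {α : Type} (key : α → Int) (x : α) (hs ls : List α)
    (hh : ∀ h ∈ hs, key x ≤ key h) (hl : ∀ l ∈ ls, key l < key x) :
    PySem.List.insertBy (fun a b => decide (key b < key a)) x (hs ++ ls) = hs ++ x :: ls := by
  induction hs with
  | nil =>
    cases ls with
    | nil => rfl
    | cons l ls' =>
      simp only [List.nil_append, PySem.List.insertBy]
      rw [if_pos (by simpa using hl l (by simp))]
  | cons h hs' ih =>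
    simp only [List.cons_append, PySem.List.insertBy]
    rw [if_neg (by simpa using not_lt.mpr (hh h (by simp)))]
    simp only [List.cons.injEq, true_and]
    exact ih (fun h' hm => hh h' (by simp [hm]))

-- folding a block of equal-key elements into hs ++ ls keeps it as one block between hs and ls
theorem pv_fold_block {α : Type} (key : α → Int) (k : Int) (bs : List α) :
    ∀ hs ls : List α, (∀ b ∈ bs, key b = k) → (∀ h ∈ hs, k ≤ key h) → (∀ l ∈ ls, key l < k) →
    bs.foldl (fun acc b => PySem.List.insertBy (fun a b => decide (key b < key a)) b acc) (hs ++ ls)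
      = hs ++ bs ++ ls := by
  induction bs with
  | nil => intro hs ls _ _ _; simp
  | cons b bs' ih =>
    intro hs ls hb hh hl
    have hbk : key b = k := hb b (by simp)
    simp only [List.foldl_cons]
    rw [pv_insert_split key b hs ls (fun h hm => hbk ▸ hh h hm) (fun l hm => hbk ▸ hl l hm)]
    have := ih (hs ++ [b]) ls (fun x hm => hb x (by simp [hm]))
      (fun h hm => by rcases List.mem_append.mp hm with h1 | h1
                      · exact hh h h1
                      · simp at h1; simp [h1, hbk]) hl
    simpa using this

-- folding the g-blocks (keys strictly decreasing across blocks) into pre ++ f-blocks interleaves them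
theorem pv_fold_blocks {α : Type} (key : α → Int) (f g : Int → List α) (ks : List Int) :
    ∀ pre : List α, ks.Pairwise (· > ·) →
    (∀ k ∈ ks, ∀ x ∈ f k, key x = k) → (∀ k ∈ ks, ∀ x ∈ g k, key x = k) →
    (∀ a ∈ pre, ∀ k ∈ ks, k < key a) →
    (ks.flatMap g).foldl (fun acc b => PySem.List.insertBy (fun a b => decide (key b < key a)) b acc)
        (pre ++ ks.flatMap f)
      = pre ++ ks.flatMap (fun k => f k ++ g k) := by
  induction ks with
  | nil => intro pre _ _ _ _; simp
  | cons k0 rest ih =>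
    intro pre hpw hf hg hpre
    have hpw' := (List.pairwise_cons.mp hpw).2
    have hhead := (List.pairwise_cons.mp hpw).1
    have step1 : (g k0).foldl (fun acc b => PySem.List.insertBy (fun a b => decide (key b < key a)) b acc)
        ((pre ++ f k0) ++ List.flatMap f rest)
        = ((pre ++ f k0) ++ g k0) ++ List.flatMap f rest := by
      have := pv_fold_block key k0 (g k0) (pre ++ f k0) (List.flatMap f rest)
        (fun b hb => hg k0 (by simp) b hb)
        (fun h hm => by rcases List.mem_append.mp hm with h1 | h1
                        · exact le_of_lt (hpre h h1 k0 (by simp))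
                        · exact le_of_eq (hf k0 (by simp) h h1).symm)
        (fun l hm => by rcases List.mem_flatMap.mp hm with ⟨k', hk', hl⟩
                        exact (hf k' (by simp [hk']) l hl) ▸ hhead k' hk')
      simpa using this
    have step2 := ih ((pre ++ f k0) ++ g k0) hpw'
      (fun k hk x hx => hf k (by simp [hk]) x hx)
      (fun k hk x hx => hg k (by simp [hk]) x hx)
      (fun a ha k hk => by
        rcases List.mem_append.mp ha with h1 | h1
        · rcases List.mem_append.mp h1 with h2 | h2
          · exact lt_trans (hhead k hk) (hpre a h2 k0 (by simp))
          · exact (hf k0 (by simp) a h2) ▸ hhead k hk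
        · exact (hg k0 (by simp) a h1) ▸ hhead k hk)
    rw [List.flatMap_cons, List.flatMap_cons, List.foldl_append,
      show pre ++ (f k0 ++ List.flatMap f rest) = (pre ++ f k0) ++ List.flatMap f rest from
        (List.append_assoc _ _ _).symm,
      step1, step2]
    simp [List.flatMap_cons]

-- a slice s[i:i+k] inside the string has length k
theorem pv_len_slice (s : String) (i k : Int) (h0 : 0 ≤ i) (hk : 0 ≤ k)
    (hub : i + k ≤ PySem.Str.len s) :
    PySem.Str.len (PySem.Str.slice s (some i) (some (i + k))) = k := by
  rw [PySem.Str.len_eq, PySem.Str.toList_slice, PySem.Chars.slice_eq_listSlice,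
    PySem.List.slice_toNat _ h0 (by omega)]
  rw [PySem.Str.len_eq] at hub
  simp only [List.length_take, List.length_drop]
  omega

-- the A-side nested append-fold for one strand equals the flatMap of the rows
theorem pv_strand_fold (s o : String) (L : Int) (lens : List Int) (acc : List (String × String)) :
    lens.foldl (fun acc k =>
        (PySem.List.pyRange 0 (L - k + 1) 1).foldl (fun acc i =>
          acc ++ [(PySem.Str.slice s (some i) (some (i + k)), o)]) acc) acc
      = acc ++ lens.flatMap (fun k =>
          (PySem.List.pyRange 0 (L - k + 1) 1).map (fun i =>
            (PySem.Str.slice s (some i) (some (i + k)), o))) := by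
  induction lens generalizing acc with
  | nil => simp
  | cons k rest ih =>
    simp only [List.foldl_cons, List.flatMap_cons]
    rw [PySem.List.foldl_append_singleton_eq_map, ih]
    simp

theorem pv_len_rc (s : String) : PySem.Str.len (pvRc s) = PySem.Str.len s := by
  simp [pvRc, PySem.Str.len_eq]

-- the A-side foldl-with-if builds exactly the filter (cites PySem.List.foldl_append_if)
theorem pv_foldl_filter (L : Int) (xs : List Int) (acc : List Int) :
    xs.foldl (fun acc k => if k ≤ L then acc ++ [k] else acc) acc
      = acc ++ xs.filter (fun k => k ≤ L) := by
  have := PySem.List.foldl_append_if (fun k : Int => decide (k ≤ L)) id xs acc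
  simpa using this

-- mirror identity on lists: a k-window of the reversed-and-mapped list is the mapped-and-reversed
-- k-window at the mirrored position
theorem pv_list_mirror {α β : Type} (l : List α) (f : α → β) (a k : Nat) :
    (((l.map f).reverse.drop a).take k)
      = (((l.drop (l.length - a - k)).take ((l.length - a) - (l.length - a - k))).map f).reverse := by
  have hmin : min (l.length - a) l.length = l.length - a := by omega
  rw [List.drop_reverse, List.length_map, List.take_reverse, List.length_take, List.length_map,
    hmin, List.drop_take, List.map_take, List.map_drop]

-- slice of rc = rc of the mirrored slice (the identity B relies on)
theorem pv_slice_rc (s : String) (i k : Int) (h0 : 0 ≤ i) (hk : 0 ≤ k)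
    (hub : i + k ≤ PySem.Str.len s) :
    PySem.Str.slice (pvRc s) (some i) (some (i + k))
      = pvRc (PySem.Str.slice s (some (PySem.Str.len s - i - k)) (some (PySem.Str.len s - i))) := by
  have hlen : PySem.Str.len s = (s.toList.length : Int) := PySem.Str.len_eq s
  apply String.toList_inj.mp
  rw [PySem.Str.toList_slice, PySem.Chars.slice_eq_listSlice,
    PySem.List.slice_toNat _ h0 (by omega)]
  have hrc : (pvRc s).toList = (s.toList.map pvComp).reverse := by
    simp [pvRc]
  rw [hrc]
  have h2 : (pvRc (PySem.Str.slice s (some (PySem.Str.len s - i - k)) (some (PySem.Str.len s - i)))).toList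
      = (((PySem.Str.slice s (some (PySem.Str.len s - i - k)) (some (PySem.Str.len s - i))).toList).map pvComp).reverse := by
    simp [pvRc]
  rw [h2, PySem.Str.toList_slice, PySem.Chars.slice_eq_listSlice,
    PySem.List.slice_toNat _ (by omega) (by omega)]
  have := pv_list_mirror s.toList pvComp i.toNat ((i + k).toNat - i.toNat)
  rw [this]
  have hx : s.toList.length - i.toNat - ((i + k).toNat - i.toNat) = (PySem.Str.len s - i - k).toNat := by
    omega
  rw [hx]
  have hy : s.toList.length - i.toNat - (PySem.Str.len s - i - k).toNat
      = (PySem.Str.len s - i).toNat - (PySem.Str.len s - i - k).toNat := by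
    omega
  rw [hy]

-- the '-' row of A (windows of rc(lk)) is B's reversed-window row (rc applied per window)
theorem pv_minus_row (lk : String) (k : Int) (hk0 : 0 ≤ k) (hkL : k ≤ PySem.Str.len lk) :
    (((PySem.List.pyRange 0 (PySem.Str.len lk - k + 1) 1).map
        (fun i => PySem.Str.slice lk (some i) (some (i + k)))).reverse).map
      (fun w => (pvRc w, "-"))
      = (PySem.List.pyRange 0 (PySem.Str.len lk - k + 1) 1).map
          (fun i => (PySem.Str.slice (pvRc lk) (some i) (some (i + k)), "-")) := by
  have hLnn : 0 ≤ PySem.Str.len lk := by rw [PySem.Str.len_eq]; exact Int.natCast_nonneg _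
  rw [PySem.List.pyRange_one]
  set nt := (PySem.Str.len lk - k + 1 - 0).toNat with hnt
  have hntI : (nt : Int) = PySem.Str.len lk - k + 1 := by omega
  apply List.ext_getElem (by simp)
  intro j h1 h2
  simp only [List.getElem_map, List.getElem_reverse, List.length_map, List.length_range,
    List.getElem_range, zero_add]
  simp only [List.length_map, List.length_range] at h2
  have hj : j < nt := by simpa using h2
  have e1 : ((nt - 1 - j : Nat) : Int) = PySem.Str.len lk - (j : Int) - k := by omega
  rw [e1, show PySem.Str.len lk - (j : Int) - k + k = PySem.Str.len lk - (j : Int) from by ring,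
    pv_slice_rc lk (j : Int) k (by omega) hk0 (by omega)]

-- B's accumulator loop over the lengths equals the flatMap of its per-length blocks,
-- with the '-' block rewritten as windows of rc(lk) via pv_minus_row
set_option maxHeartbeats 1000000 in
theorem pv_b_fold (lk : String) (lens : List Int)
    (hmem : ∀ k ∈ lens, 0 ≤ k ∧ k ≤ PySem.Str.len lk) (acc : List (String × String)) :
    lens.foldl (fun tiles k =>
        (tiles ++ ((PySem.List.pyRange 0 (PySem.Str.len lk - k + 1) 1).map
            (fun i => PySem.Str.slice lk (some i) (some (i + k)))).map (fun w => (w, "+")))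
          ++ ((PySem.List.pyRange 0 (PySem.Str.len lk - k + 1) 1).map
            (fun i => PySem.Str.slice lk (some i) (some (i + k)))).reverse.map
              (fun w => (pvRc w, "-"))) acc
      = acc ++ lens.flatMap (fun k =>
          (PySem.List.pyRange 0 (PySem.Str.len lk - k + 1) 1).map (fun i =>
            (PySem.Str.slice lk (some i) (some (i + k)), "+"))
          ++ (PySem.List.pyRange 0 (PySem.Str.len lk - k + 1) 1).map (fun i =>
            (PySem.Str.slice (pvRc lk) (some i) (some (i + k)), "-"))) := by
  induction lens generalizing acc with
  | nil => simp
  | cons k rest ih =>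
    obtain ⟨hk0, hkL⟩ := hmem k (by simp)
    simp only [List.foldl_cons, List.flatMap_cons]
    rw [ih (fun k hk => hmem k (by simp [hk])), pv_minus_row lk k hk0 hkL, List.map_map]
    simp only [Function.comp_def]
    simp only [List.append_assoc]

-- ===== VERDICT (by name: the statement is the Claim_ definition above) =====
set_option maxHeartbeats 2000000 in
theorem build_tiles_spec : Claim_equal_build_tiles := by
  intro linker _
  unfold Spec_build_tiles
  simp only [build_tiles, build_tiles_alt]
  set lk := PySem.Str.replace (PySem.Str.upper linker) "U" "T" with hlk
  set L : Int := PySem.Str.len lk with hL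
  set rcl := pvRc lk with hrcl
  have hrclen : PySem.Str.len rcl = L := by rw [hrcl, pv_len_rc, hL]
  rw [pv_foldl_filter L [L, 31, 21, MIN_LINKER] [], List.nil_append]
  set lens := PySem.List.sorted
      (PySem.Set.ofList ([L, 31, 21, MIN_LINKER].filter (fun k => k ≤ L))) (fun x => x) true
    with hlens
  have hnodup : lens.Nodup :=
    ((PySem.List.sorted_perm _ _ _).nodup_iff).mpr (PySem.Set.nodup_ofList _)
  have hdesc : lens.Pairwise (· > ·) := by
    have h1 := PySem.List.sorted_pairwise_rev
      (PySem.Set.ofList ([L, 31, 21, MIN_LINKER].filter (fun k => k ≤ L))) (fun x : Int => x)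
    have h2 := List.Pairwise.and h1 hnodup
    exact h2.imp (fun {a b} hab => lt_of_le_of_ne hab.1 (Ne.symm hab.2))
  have hLnn : 0 ≤ L := by rw [hL, PySem.Str.len_eq]; exact Int.natCast_nonneg _
  have hmem : ∀ k ∈ lens, 0 ≤ k ∧ k ≤ L := by
    intro k hk
    rw [hlens, PySem.List.mem_sorted, PySem.Set.mem_ofList, List.mem_filter] at hk
    obtain ⟨hin, hle⟩ := hk
    refine ⟨?_, by simpa using hle⟩
    simp only [List.mem_cons, List.not_mem_nil, or_false, MIN_LINKER] at hin
    rcases hin with h | h | h | h <;> omega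
  have hrowkey : ∀ (s o : String), PySem.Str.len s = L → ∀ k ∈ lens,
      ∀ t ∈ (PySem.List.pyRange 0 (L - k + 1) 1).map (fun i =>
        (PySem.Str.slice s (some i) (some (i + k)), o)), PySem.Str.len t.1 = k := by
    intro s o hsL k hk t ht
    rcases List.mem_map.mp ht with ⟨i, hi, rfl⟩
    rw [PySem.List.mem_pyRange_one] at hi
    obtain ⟨hkl, hku⟩ := hmem k hk
    exact pv_len_slice s i k hi.1 hkl (by rw [hsL]; omega)
  -- A's pre-sort tiles list as two flatMaps
  simp only [List.foldl_cons, List.foldl_nil]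
  rw [pv_strand_fold lk "+" L lens [], List.nil_append, pv_strand_fold rcl "-" L lens _]
  -- stable reverse-sort interleaves the per-length blocks
  rw [PySem.List.sorted_rev_eq_foldl_insertBy, List.foldl_append]
  have hplus : (lens.flatMap (fun k => (PySem.List.pyRange 0 (L - k + 1) 1).map (fun i =>
          (PySem.Str.slice lk (some i) (some (i + k)), "+")))).foldl
      (fun acc b => PySem.List.insertBy
        (fun a b => decide (PySem.Str.len b.1 < PySem.Str.len a.1)) b acc) []
      = lens.flatMap (fun k => (PySem.List.pyRange 0 (L - k + 1) 1).map (fun i =>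
          (PySem.Str.slice lk (some i) (some (i + k)), "+"))) := by
    have h3 := pv_fold_blocks (fun t : String × String => PySem.Str.len t.1)
      (fun _ => []) (fun k => (PySem.List.pyRange 0 (L - k + 1) 1).map (fun i =>
          (PySem.Str.slice lk (some i) (some (i + k)), "+"))) lens [] hdesc
      (by intro k _ x hx; simp at hx)
      (fun k hk x hx => hrowkey lk "+" rfl k hk x hx)
      (by intro a ha; simp at ha)
    have hnil : lens.flatMap (fun _ : Int => ([] : List (String × String))) = [] :=
      List.flatMap_eq_nil_iff.mpr (fun _ _ => rfl)
    simpa only [hnil, List.nil_append] using h3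
  rw [hplus]
  have hmix := pv_fold_blocks (fun t : String × String => PySem.Str.len t.1)
    (fun k => (PySem.List.pyRange 0 (L - k + 1) 1).map (fun i =>
        (PySem.Str.slice lk (some i) (some (i + k)), "+")))
    (fun k => (PySem.List.pyRange 0 (L - k + 1) 1).map (fun i =>
        (PySem.Str.slice rcl (some i) (some (i + k)), "-"))) lens [] hdesc
    (fun k hk x hx => hrowkey lk "+" rfl k hk x hx)
    (fun k hk x hx => hrowkey rcl "-" hrclen k hk x hx)
    (by intro a ha; simp at ha)
  simp only [List.nil_append] at hmix
  rw [hmix]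
  simp only [hL] at hmem
  rw [hL, hrcl, pv_b_fold lk lens hmem [], List.nil_append]
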